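-- pv_equiv track=rewrite | github.com/healthylaife/CEHR-GAN-BERT | models/PreTrainingModel.py | index_seg
-- ===== SOURCE A (Python) =====
-- VE = 2
--
-- def index_seg(tokens, symbol=VE):
--     flag = 0
--     seg = []
--
--     for token in tokens:
--         if token == symbol:
--             seg.append(flag)
--             if flag == 0:
--                 flag = 1
--             else:
--                 flag = 0
--         else:
--             seg.append(flag)
--     return seg
-- ===== SOURCE B (Python) =====
-- VE = 2
--
-- def index_seg(tokens, symbol=VE):
--     # stage 1: 0/1 hit table, then exclusive prefix-count table
--     hits = [1 if token == symbol else 0 for token in tokens]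
--     prefix = [0]
--     for h in hits:
--         prefix.append(prefix[-1] + h)
--     prefix.pop()  # each position reflects symbols strictly before it
--     # stage 2: parity of each prefix count
--     return [c % 2 for c in prefix]
-- ===== Notes on version B (the rewrite author's own statement) =====
-- stated objective: alternative
-- what changed: Replaces the toggling flag state machine by a two-stage table construction: map tokens to 0/1 hits, build the exclusive prefix-count table, then map each count to its parity.
import Mathlib
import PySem

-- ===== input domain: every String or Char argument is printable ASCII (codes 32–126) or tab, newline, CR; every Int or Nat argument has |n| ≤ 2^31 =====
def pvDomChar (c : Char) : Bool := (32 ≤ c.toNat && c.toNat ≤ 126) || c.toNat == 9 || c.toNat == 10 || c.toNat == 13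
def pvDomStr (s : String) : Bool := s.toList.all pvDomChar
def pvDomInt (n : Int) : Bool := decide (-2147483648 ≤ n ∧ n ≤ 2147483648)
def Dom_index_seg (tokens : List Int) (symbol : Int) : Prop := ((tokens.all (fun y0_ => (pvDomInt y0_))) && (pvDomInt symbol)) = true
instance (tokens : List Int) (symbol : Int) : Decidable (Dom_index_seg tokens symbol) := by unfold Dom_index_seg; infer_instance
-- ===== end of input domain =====

-- B replaces A's toggling-flag loop by a two-stage table: hit list -> exclusive prefix counts -> parity map (alternative decomposition, same cost).

-- ===== PORT A =====
-- the for-loop with state (flag, seg) as structural recursion over tokens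
def indexSegLoop (tokens : List Int) (symbol : Int) (flag : Int) (seg : List Int) : List Int :=
  match tokens with
  | [] => seg
  | token :: rest =>
    if token = symbol then
      indexSegLoop rest symbol (if flag = 0 then 1 else 0) (seg ++ [flag])
    else
      indexSegLoop rest symbol flag (seg ++ [flag])

def index_seg (tokens : List Int) (symbol : Int) : List Int :=
  indexSegLoop tokens symbol 0 []

-- ===== PORT B =====
def index_seg_alt (tokens : List Int) (symbol : Int) : List Int :=
  let hits := tokens.map (fun token => if token = symbol then (1 : Int) else 0)
  let pre := hits.foldl (fun acc h => acc ++ [acc.getLast! + h]) [(0 : Int)]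
  (pre.dropLast).map (fun c => PySem.Int.mod c 2)

-- ===== PRECONDITION & SPEC =====
def Spec_index_seg (tokens : List Int) (symbol : Int) (out : List Int) : Prop := out = index_seg_alt tokens symbol
instance (tokens : List Int) (symbol : Int) (out : List Int) : Decidable (Spec_index_seg tokens symbol out) := by unfold Spec_index_seg; infer_instance

-- ===== CLAIM (what is proved, stated in full; the proofs are below) =====
def Claim_equal_index_seg : Prop := ∀ (tokens : List Int) (symbol : Int), Dom_index_seg tokens symbol → Spec_index_seg tokens symbol (index_seg tokens symbol)

-- ===== LEMMAS AND PROOFS =====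

-- proof-side helpers: exclusive prefix counts and inclusive running sums
def prefixCounts (c : Int) (hits : List Int) : List Int :=
  match hits with
  | [] => []
  | h :: rest => c :: prefixCounts (c + h) rest

def tailSums (c : Int) (hits : List Int) : List Int :=
  match hits with
  | [] => []
  | h :: rest => (c + h) :: tailSums (c + h) rest

theorem foldl_prefix_eq (hits : List Int) (acc : List Int) (hne : acc ≠ []) :
    hits.foldl (fun acc h => acc ++ [acc.getLast! + h]) acc = acc ++ tailSums (acc.getLast!) hits := by
  induction hits generalizing acc with
  | nil => simp [tailSums]
  | cons h rest ih =>
    simp only [List.foldl_cons, tailSums]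
    rw [ih (acc ++ [acc.getLast! + h]) (by simp)]
    have hlast : (acc ++ [acc.getLast! + h]).getLast! = acc.getLast! + h := by
      simp
    rw [hlast]
    simp

theorem dropLast_cons_tailSums (hits : List Int) (c : Int) :
    (c :: tailSums c hits).dropLast = prefixCounts c hits := by
  induction hits generalizing c with
  | nil => simp [tailSums, prefixCounts]
  | cons h rest ih =>
    simp only [tailSums, prefixCounts, List.dropLast_cons₂]
    rw [ih (c + h)]

-- generalized loop invariant: with flag = c % 2 (c ≥ 0), the loop appends the parity of the running count
theorem indexSegLoop_eq (tokens : List Int) (symbol : Int) (c : Int) (hc : 0 ≤ c) (seg : List Int) :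
    indexSegLoop tokens symbol (c % 2) seg =
      seg ++ (prefixCounts c (tokens.map (fun token => if token = symbol then (1 : Int) else 0))).map
        (fun x => PySem.Int.mod x 2) := by
  induction tokens generalizing c seg with
  | nil => simp [indexSegLoop, prefixCounts]
  | cons t rest ih =>
    simp only [indexSegLoop, List.map_cons, prefixCounts]
    by_cases h : t = symbol
    · simp only [h]
      have htog : (if c % 2 = 0 then (1 : Int) else 0) = (c + 1) % 2 := by omega
      rw [htog, ih (c + 1) (by omega)]
      simp [PySem.Int.mod, Int.fmod_eq_emod]
    · simp only [if_neg h]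
      rw [ih c hc]
      simp [PySem.Int.mod, Int.fmod_eq_emod]

-- ===== VERDICT (by name: the statement is the Claim_ definition above) =====
theorem index_seg_spec : Claim_equal_index_seg := by
  intro tokens symbol _
  unfold Spec_index_seg index_seg index_seg_alt
  simp only []
  rw [foldl_prefix_eq _ [(0 : Int)] (by simp)]
  have h0 : ([(0 : Int)]).getLast! = 0 := by simp
  rw [h0]
  rw [show ([(0 : Int)] ++ tailSums 0 (tokens.map (fun token => if token = symbol then (1 : Int) else 0))) = ((0 : Int) :: tailSums 0 (tokens.map (fun token => if token = symbol then (1 : Int) else 0))) from rfl,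
     dropLast_cons_tailSums]
  have := indexSegLoop_eq tokens symbol 0 (by norm_num) []
  simpa using this
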